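-- pv_equiv track=rewrite | github.com/sviam-byte/-ds | interfaces/gui.py | _parse_vars
-- ===== SOURCE A (Python) =====
-- def _parse_vars(text: str, ncols: int) -> list:
--     t = (text or "").strip().lower()
--     if not t or t == "all":
--         return [f"c{i+1}" for i in range(ncols)]
--     # допускаем 'c1,c3' или '1,3'
--     parts = [p.strip() for p in t.replace(";", ",").split(",") if p.strip()]
--     out = []
--     for p in parts:
--         if p.startswith("c"):
--             try:
--                 k = int(p[1:])
--                 if 1 <= k <= ncols:
--                     out.append(f"c{k}")
--             except Exception:
--                 pass
--         else:
--             try: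
--                 k = int(p)
--                 if 1 <= k <= ncols:
--                     out.append(f"c{k}")
--             except Exception:
--                 pass
--     return sorted(set(out), key=lambda s: int(s[1:]))
-- ===== SOURCE B (Python) =====
-- def _insert_sorted(ks, k):
--     # keep ks strictly increasing: find k's slot, skip if already present
--     i = 0
--     while i < len(ks) and ks[i] < k:
--         i += 1
--     if i == len(ks) or ks[i] != k:
--         ks.insert(i, k)
--
--
-- def _parse_vars(text: str, ncols: int) -> list:
--     t = (text or "").strip().lower()
--     if not t or t == "all":
--         return [f"c{i+1}" for i in range(ncols)]
--     ks = []  # sorted duplicate-free column numbers, maintained online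
--     for raw in t.replace(";", ",").split(","):
--         tok = raw.strip()
--         if tok.startswith("c"):
--             tok = tok[1:]
--         try:
--             k = int(tok)
--         except ValueError:
--             continue
--         if 1 <= k <= ncols:
--             _insert_sorted(ks, k)
--     return [f"c{k}" for k in ks]
-- ===== Notes on version B (the rewrite author's own statement) =====
-- stated objective: alternative
-- what changed: B replaces A's collect-then-dedupe-then-sort pipeline (append formatted strings, set(), Timsort with an int(s[1:]) reparse key) by maintaining a strictly increasing duplicate-free list of column numbers via online sorted insertion during the single token scan, formatting once at the end; A's two duplicated parsing branches collapse into one.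
import Mathlib
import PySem

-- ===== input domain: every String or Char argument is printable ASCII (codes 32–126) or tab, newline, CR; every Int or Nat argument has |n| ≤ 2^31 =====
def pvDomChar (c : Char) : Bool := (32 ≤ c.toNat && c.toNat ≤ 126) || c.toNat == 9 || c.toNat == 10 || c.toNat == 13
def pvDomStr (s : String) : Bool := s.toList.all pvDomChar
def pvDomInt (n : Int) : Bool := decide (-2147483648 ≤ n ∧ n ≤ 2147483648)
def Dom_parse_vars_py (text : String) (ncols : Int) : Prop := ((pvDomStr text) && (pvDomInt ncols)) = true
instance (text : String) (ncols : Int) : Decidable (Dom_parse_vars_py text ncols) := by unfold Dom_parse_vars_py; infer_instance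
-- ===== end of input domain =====

-- B keeps a strictly-increasing duplicate-free list of column numbers by sorted insertion during the
-- single token scan (no set, no final sort, no sort-key reparse), formatting once at the end
-- (objective: alternative — online insertion sort with dedup instead of offline set + Timsort).


-- ===== PORT A =====
-- f"c{k}" (PySem.Int.toChars k = (str(k)).toList)
def pvFmt (k : Int) : String := String.ofList ('c' :: PySem.Int.toChars k)

-- the sort key `lambda s: int(s[1:])`, ported by hand as a plain decimal-digit evaluator:
-- it is exact on every string A's sort applies it to (each element of `out` is 'c' followed by
-- the decimal digits of a positive int, on which Python's int() is exactly this left fold).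
def pvDecVal (cs : List Char) : Int := cs.foldl (fun a c => a * 10 + ((c.toNat : Int) - 48)) 0
def pvKey (s : String) : Int := pvDecVal (s.toList.drop 1)

def parse_vars_py (text : String) (ncols : Int) : List String :=
  let t := PySem.Chars.lower (PySem.Chars.strip text.toList)
  if t = [] ∨ t = ['a', 'l', 'l'] then
    (PySem.List.pyRange 0 ncols 1).map (fun i => pvFmt (i + 1))
  else
    let parts := ((PySem.Chars.splitOn (PySem.Chars.replace t [';'] [',']) [',']).map
        PySem.Chars.strip).filter (fun p => !p.isEmpty)
    let out := parts.foldl (fun out p =>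
      if PySem.Chars.startswith p ['c'] then
        match PySem.Int.ofChars? (p.drop 1) with
        | some k => if 1 ≤ k ∧ k ≤ ncols then out ++ [pvFmt k] else out
        | none => out
      else
        match PySem.Int.ofChars? p with
        | some k => if 1 ≤ k ∧ k ≤ ncols then out ++ [pvFmt k] else out
        | none => out) []
    PySem.List.sorted (PySem.Set.ofList out) pvKey false

-- ===== PORT B =====
-- `_insert_sorted(ks, k)`: the index-scan + insert, as the obvious structural recursion over ks
def pvIns (k : Int) : List Int → List Int
  | [] => [k]
  | x :: xs => if x < k then x :: pvIns k xs else if x ≠ k then k :: x :: xs else x :: xs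

def parse_vars_py_alt (text : String) (ncols : Int) : List String :=
  let t := PySem.Chars.lower (PySem.Chars.strip text.toList)
  if t = [] ∨ t = ['a', 'l', 'l'] then
    (PySem.List.pyRange 0 ncols 1).map (fun i => pvFmt (i + 1))
  else
    let ks := (PySem.Chars.splitOn (PySem.Chars.replace t [';'] [',']) [',']).foldl
      (fun ks raw =>
        match PySem.Int.ofChars?
            (if PySem.Chars.startswith (PySem.Chars.strip raw) ['c'] then
              (PySem.Chars.strip raw).drop 1
            else PySem.Chars.strip raw) with
        | some k => if 1 ≤ k ∧ k ≤ ncols then pvIns k ks else ks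
        | none => ks) []
    ks.map pvFmt

-- ===== PRECONDITION & SPEC =====
def Spec_parse_vars_py (text : String) (ncols : Int) (out : List String) : Prop := out = parse_vars_py_alt text ncols
instance (text : String) (ncols : Int) (out : List String) : Decidable (Spec_parse_vars_py text ncols out) := by unfold Spec_parse_vars_py; infer_instance

-- ===== CLAIM (what is proved, stated in full; the proofs are below) =====
def Claim_equal_parse_vars_py : Prop := ∀ (text : String) (ncols : Int), Dom_parse_vars_py text ncols → Spec_parse_vars_py text ncols (parse_vars_py text ncols)

-- ===== LEMMAS AND PROOFS =====

-- the per-token parse both loops perform: strip one optional leading 'c', int(), range check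
def pvVal (ncols : Int) (p : List Char) : Option Int :=
  match PySem.Int.ofChars? (if PySem.Chars.startswith p ['c'] then p.drop 1 else p) with
  | some k => if 1 ≤ k ∧ k ≤ ncols then some k else none
  | none => none

-- the decimal digits of n, most significant first (the spec of Nat.toDigits 10)
def pvDigits (n : Nat) : List Char :=
  if _h : n < 10 then [Nat.digitChar n]
  else pvDigits (n / 10) ++ [Nat.digitChar (n % 10)]
decreasing_by exact Nat.div_lt_self (by omega) (by omega)

theorem pvDigitChar_toNat (m : Nat) (h : m < 10) : (Nat.digitChar m).toNat = 48 + m := by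
  interval_cases m <;> rfl

theorem toDigitsCore_spec (f n : Nat) (ds : List Char) (hf : n < f) :
    Nat.toDigitsCore 10 f n ds = pvDigits n ++ ds := by
  induction f generalizing n ds with
  | zero => omega
  | succ f ih =>
    rw [Nat.toDigitsCore]
    by_cases h : n / 10 = 0
    · have hn : n < 10 := by omega
      simp [h, pvDigits, hn, Nat.mod_eq_of_lt hn]
    · have hlt : n / 10 < f := by
        have := Nat.div_lt_self (n := n) (by omega) (show 1 < 10 by omega)
        omega
      rw [if_neg h, ih _ _ hlt]
      conv_rhs => rw [pvDigits]
      have hn : ¬ n < 10 := by omega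
      simp [hn]

theorem toDigits_eq_pvDigits (n : Nat) : Nat.toDigits 10 n = pvDigits n := by
  rw [Nat.toDigits, toDigitsCore_spec _ _ _ (by omega), List.append_nil]

theorem pvDecVal_from (a : Int) (n : Nat) :
    (pvDigits n).foldl (fun a c => a * 10 + ((c.toNat : Int) - 48)) a
      = a * 10 ^ (pvDigits n).length + n := by
  induction n using Nat.strong_induction_on generalizing a with
  | _ n ih =>
    rw [pvDigits]
    by_cases h : n < 10
    · simp [h, pvDigitChar_toNat n h]
    · have hd : n / 10 < n := Nat.div_lt_self (by omega) (by omega)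
      have hm : (Nat.digitChar (n % 10)).toNat = 48 + n % 10 :=
        pvDigitChar_toNat _ (Nat.mod_lt _ (by omega))
      simp only [h, dite_false, List.foldl_append, List.length_append, List.foldl_cons,
        List.foldl_nil, List.length_cons, List.length_nil, ih _ hd, hm]
      have hnm : (n : Int) = 10 * (↑(n / 10)) + ↑(n % 10) := by
        push_cast [Nat.div_add_mod]; omega
      rw [hnm]
      push_cast
      ring

theorem pvDecVal_toChars (k : Int) (hk : 0 ≤ k) : pvDecVal (PySem.Int.toChars k) = k := by
  have h1 : PySem.Int.toChars k = pvDigits k.toNat := by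
    rw [PySem.Int.toChars, if_neg (by omega), toDigits_eq_pvDigits]
  rw [pvDecVal, h1, pvDecVal_from]
  simp [Int.toNat_of_nonneg hk]

theorem pvKey_pvFmt (k : Int) (hk : 0 ≤ k) : pvKey (pvFmt k) = k := by
  rw [pvKey, pvFmt]
  simp only [String.toList_ofList, List.drop_succ_cons, List.drop_zero]
  exact pvDecVal_toChars k hk

theorem pvFmt_inj (a b : Int) (ha : 0 ≤ a) (hb : 0 ≤ b) (h : pvFmt a = pvFmt b) : a = b := by
  have := congrArg pvKey h
  rwa [pvKey_pvFmt a ha, pvKey_pvFmt b hb] at this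

-- A's loop body equals the branch-free body driven by pvVal
theorem pvbodyA_eq (ncols : Int) (out : List String) (p : List Char) :
    (if PySem.Chars.startswith p ['c'] then
        match PySem.Int.ofChars? (p.drop 1) with
        | some k => if 1 ≤ k ∧ k ≤ ncols then out ++ [pvFmt k] else out
        | none => out
      else
        match PySem.Int.ofChars? p with
        | some k => if 1 ≤ k ∧ k ≤ ncols then out ++ [pvFmt k] else out
        | none => out)
      = out ++ ((pvVal ncols p).toList).map pvFmt := by
  rw [pvVal]
  by_cases h : PySem.Chars.startswith p ['c'] = true
  · rw [if_pos h, if_pos h]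
    cases hofc : PySem.Int.ofChars? (p.drop 1) with
    | none => simp
    | some k =>
      by_cases hk : 1 ≤ k ∧ k ≤ ncols
      · simp [hk]
      · simp [hk]
  · rw [if_neg h, if_neg h]
    cases hofc : PySem.Int.ofChars? p with
    | none => simp
    | some k =>
      by_cases hk : 1 ≤ k ∧ k ≤ ncols
      · simp [hk]
      · simp [hk]

-- A's fold builds the formatted valid tokens in order
theorem pvfoldA (ncols : Int) (parts : List (List Char)) (acc : List String) :
    parts.foldl (fun out p =>
      if PySem.Chars.startswith p ['c'] then
        match PySem.Int.ofChars? (p.drop 1) with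
        | some k => if 1 ≤ k ∧ k ≤ ncols then out ++ [pvFmt k] else out
        | none => out
      else
        match PySem.Int.ofChars? p with
        | some k => if 1 ≤ k ∧ k ≤ ncols then out ++ [pvFmt k] else out
        | none => out) acc
      = acc ++ (parts.filterMap (pvVal ncols)).map pvFmt := by
  induction parts generalizing acc with
  | nil => simp
  | cons p rest ih =>
    rw [List.foldl_cons, pvbodyA_eq, ih, List.filterMap_cons]
    cases h : pvVal ncols p with
    | none => simp
    | some k => simp

-- B's loop body is: insert the parsed token's value if any
theorem pvbodyB_eq (ncols : Int) (ks : List Int) (raw : List Char) :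
    (match PySem.Int.ofChars?
        (if PySem.Chars.startswith (PySem.Chars.strip raw) ['c'] then
          (PySem.Chars.strip raw).drop 1
        else PySem.Chars.strip raw) with
     | some k => if 1 ≤ k ∧ k ≤ ncols then pvIns k ks else ks
     | none => ks)
      = (match pvVal ncols (PySem.Chars.strip raw) with
         | some k => pvIns k ks
         | none => ks) := by
  rw [pvVal]
  cases hofc : PySem.Int.ofChars?
      (if PySem.Chars.startswith (PySem.Chars.strip raw) ['c'] then
        (PySem.Chars.strip raw).drop 1
      else PySem.Chars.strip raw) with
  | none => rfl
  | some k =>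
    by_cases hk : 1 ≤ k ∧ k ≤ ncols
    · simp [hk]
    · simp [hk]

-- B's fold is the pvIns-fold over the valid token values
theorem pvfoldB (ncols : Int) (raws : List (List Char)) (s : List Int) :
    raws.foldl (fun ks raw =>
        match PySem.Int.ofChars?
            (if PySem.Chars.startswith (PySem.Chars.strip raw) ['c'] then
              (PySem.Chars.strip raw).drop 1
            else PySem.Chars.strip raw) with
        | some k => if 1 ≤ k ∧ k ≤ ncols then pvIns k ks else ks
        | none => ks) s
      = (raws.filterMap (fun r => pvVal ncols (PySem.Chars.strip r))).foldl
          (fun ks k => pvIns k ks) s := by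
  induction raws generalizing s with
  | nil => rfl
  | cons r rest ih =>
    rw [List.foldl_cons, List.filterMap_cons]
    show rest.foldl _ (match PySem.Int.ofChars? _ with
      | some k => if 1 ≤ k ∧ k ≤ ncols then pvIns k s else s
      | none => s) = _
    rw [pvbodyB_eq]
    cases h : pvVal ncols (PySem.Chars.strip r) with
    | none => exact ih s
    | some k => exact ih (pvIns k s)

theorem pvVal_nil (ncols : Int) : pvVal ncols [] = none := rfl

-- skipping the empty tokens before or inside the scan is the same (the empty token parses to nothing)
theorem pvfilterMap_strip (ncols : Int) (raws : List (List Char)) :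
    raws.filterMap (fun r => pvVal ncols (PySem.Chars.strip r))
      = ((raws.map PySem.Chars.strip).filter (fun p => !p.isEmpty)).filterMap (pvVal ncols) := by
  induction raws with
  | nil => rfl
  | cons r rest ih =>
    by_cases h : PySem.Chars.strip r = []
    · simp [h, pvVal_nil, ih]
    · simp [List.filterMap_cons, h, ih]

-- pvVal only accepts values ≥ 1
theorem pvVal_pos (ncols : Int) (p : List Char) (k : Int) (h : pvVal ncols p = some k) : 1 ≤ k := by
  rw [pvVal] at h
  cases hofc : PySem.Int.ofChars? (if PySem.Chars.startswith p ['c'] then p.drop 1 else p) with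
  | none => rw [hofc] at h; simp at h
  | some m =>
    rw [hofc] at h
    by_cases hm : 1 ≤ m ∧ m ≤ ncols
    · simp [hm] at h; omega
    · simp [hm] at h

theorem pvIns_mem (k x : Int) (ks : List Int) : x ∈ pvIns k ks ↔ x = k ∨ x ∈ ks := by
  induction ks with
  | nil => simp [pvIns]
  | cons a as ih =>
    rw [pvIns]
    by_cases h1 : a < k
    · simp only [if_pos h1, List.mem_cons, ih]; tauto
    · by_cases h2 : a ≠ k
      · simp only [if_neg h1, if_pos h2, List.mem_cons]
      · have hak : a = k := by omega
        subst hak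
        simp only [if_neg h1, if_neg h2, List.mem_cons]
        tauto

theorem pvIns_pairwise (k : Int) (ks : List Int) (h : ks.Pairwise (· < ·)) :
    (pvIns k ks).Pairwise (· < ·) := by
  induction ks with
  | nil => simp [pvIns]
  | cons a as ih =>
    rw [List.pairwise_cons] at h
    rw [pvIns]
    by_cases h1 : a < k
    · rw [if_pos h1, List.pairwise_cons]
      refine ⟨?_, ih h.2⟩
      intro y hy
      rcases (pvIns_mem k y as).mp hy with rfl | hy
      · exact h1
      · exact h.1 y hy
    · by_cases h2 : a ≠ k
      · rw [if_neg h1, if_pos h2, List.pairwise_cons]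
        refine ⟨?_, List.pairwise_cons.mpr h⟩
        intro y hy
        rcases List.mem_cons.mp hy with rfl | hy
        · omega
        · have := h.1 y hy; omega
      · rw [if_neg h1, if_neg h2]
        exact List.pairwise_cons.mpr h

theorem pvfoldIns_pairwise (L : List Int) (s : List Int) (hs : s.Pairwise (· < ·)) :
    (L.foldl (fun ks k => pvIns k ks) s).Pairwise (· < ·) := by
  induction L generalizing s with
  | nil => exact hs
  | cons k rest ih => exact ih _ (pvIns_pairwise k s hs)

theorem pvfoldIns_mem (L : List Int) (s : List Int) (x : Int) :
    x ∈ L.foldl (fun ks k => pvIns k ks) s ↔ x ∈ s ∨ x ∈ L := by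
  induction L generalizing s with
  | nil => simp
  | cons k rest ih =>
    rw [List.foldl_cons, ih, pvIns_mem]
    simp only [List.mem_cons]
    tauto

-- ===== VERDICT (by name: the statement is the Claim_ definition above) =====
theorem parse_vars_py_spec : Claim_equal_parse_vars_py := by
  intro text ncols _
  unfold Spec_parse_vars_py parse_vars_py parse_vars_py_alt
  set t := PySem.Chars.lower (PySem.Chars.strip text.toList) with ht
  by_cases h0 : t = [] ∨ t = ['a', 'l', 'l']
  · rw [if_pos h0, if_pos h0]
  · rw [if_neg h0, if_neg h0]
    dsimp only
    set raws := PySem.Chars.splitOn (PySem.Chars.replace t [';'] [',']) [','] with hraws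
    set L := ((raws.map PySem.Chars.strip).filter (fun p => !p.isEmpty)).filterMap (pvVal ncols)
      with hLdef
    rw [pvfoldA, pvfoldB, pvfilterMap_strip, List.nil_append, ← hLdef]
    have hLpos : ∀ k ∈ L, 1 ≤ k := by
      intro k hk
      rw [hLdef, List.mem_filterMap] at hk
      obtain ⟨p, _, hp⟩ := hk
      exact pvVal_pos ncols p k hp
    set R := L.foldl (fun ks k => pvIns k ks) [] with hR
    have hpw : R.Pairwise (· < ·) := pvfoldIns_pairwise L [] (by simp)
    have hmemR : ∀ x, x ∈ R ↔ x ∈ L := by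
      intro x; rw [hR, pvfoldIns_mem]; simp
    have hRpos : ∀ x ∈ R, 1 ≤ x := fun x hx => hLpos x ((hmemR x).mp hx)
    apply PySem.List.sorted_eq_of_perm_of_pairwise_lt
    · refine (List.perm_ext_iff_of_nodup ?_ (PySem.Set.nodup_ofList _)).mpr ?_
      · exact List.Nodup.map_on
          (fun a ha b hb h => pvFmt_inj a b (by have := hRpos a ha; omega)
            (by have := hRpos b hb; omega) h)
          (hpw.imp (fun h => by omega)).nodup
      · intro x
        rw [PySem.Set.mem_ofList, List.mem_map, List.mem_map]
        constructor
        · rintro ⟨k, hk, rfl⟩; exact ⟨k, (hmemR k).mp hk, rfl⟩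
        · rintro ⟨k, hk, rfl⟩; exact ⟨k, (hmemR k).mpr hk, rfl⟩
    · rw [List.pairwise_map]
      refine hpw.imp_of_mem ?_
      intro a b ha hb hlt
      rw [pvKey_pvFmt a (by have := hRpos a ha; omega),
        pvKey_pvFmt b (by have := hRpos b hb; omega)]
      exact hlt
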